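-- pv_equiv track=rewrite | github.com/illumeow/FAI-final | src/players/agents/simulation_player_v2.py | _build_card_score_table
-- ===== SOURCE A (Python) =====
-- def _build_card_score_table(n_cards: int = 104) -> list[int]:
--     table = [0] * (n_cards + 1)
--     for c in range(1, n_cards + 1):
--         if c % 55 == 0:
--             table[c] = 7
--         elif c % 11 == 0:
--             table[c] = 5
--         elif c % 10 == 0:
--             table[c] = 3
--         elif c % 5 == 0:
--             table[c] = 2
--         else:
--             table[c] = 1
--     return table
-- ===== SOURCE B (Python) =====
-- def _build_card_score_table(n_cards: int = 104) -> list[int]: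
--     table = [1] * (n_cards + 1)
--     for step, score in ((5, 2), (10, 3), (11, 5), (55, 7)):
--         for c in range(step, n_cards + 1, step):
--             table[c] = score
--     if table:
--         table[0] = 0
--     return table
-- ===== Notes on version B (the rewrite author's own statement) =====
-- stated objective: alternative
-- what changed: Replaces the single loop with a per-card if/elif priority cascade by a table of 1s overwritten by four separate stepped passes (every 5th card -> 2, 10th -> 3, 11th -> 5, 55th -> 7) in increasing priority, then zeroing index 0.
import Mathlib
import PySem

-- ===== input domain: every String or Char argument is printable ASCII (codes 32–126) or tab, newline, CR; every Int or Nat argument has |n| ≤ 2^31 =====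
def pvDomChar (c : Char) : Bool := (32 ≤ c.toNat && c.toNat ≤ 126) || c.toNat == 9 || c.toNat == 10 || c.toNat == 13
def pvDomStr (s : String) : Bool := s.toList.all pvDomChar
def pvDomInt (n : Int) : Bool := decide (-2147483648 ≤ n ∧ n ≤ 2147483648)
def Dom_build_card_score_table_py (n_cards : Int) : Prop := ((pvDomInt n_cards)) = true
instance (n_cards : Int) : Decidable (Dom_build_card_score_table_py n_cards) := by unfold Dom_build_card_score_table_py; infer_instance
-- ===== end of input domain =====

-- B replaces A's per-card if/elif cascade by four stepped overwrite passes (step 5→2, 10→3, 11→5, 55→7)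
-- over a table initialised to 1, then zeroes index 0; objective: alternative decomposition, same cost.

-- ===== PORT A =====
def build_card_score_table_py (n_cards : Int) : List Int :=
  let table := List.replicate (n_cards + 1).toNat (0 : Int)
  (PySem.List.pyRange 1 (n_cards + 1) 1).foldl
    (fun table c =>
      if PySem.Int.mod c 55 = 0 then PySem.List.pySetD table c 7
      else if PySem.Int.mod c 11 = 0 then PySem.List.pySetD table c 5
      else if PySem.Int.mod c 10 = 0 then PySem.List.pySetD table c 3
      else if PySem.Int.mod c 5 = 0 then PySem.List.pySetD table c 2
      else PySem.List.pySetD table c 1) table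

-- ===== PORT B =====
def build_card_score_table_py_alt (n_cards : Int) : List Int :=
  let table := List.replicate (n_cards + 1).toNat (1 : Int)
  let table := [((5:Int),(2:Int)), (10,3), (11,5), (55,7)].foldl
    (fun table sc =>
      (PySem.List.pyRange sc.1 (n_cards + 1) sc.1).foldl
        (fun table c => PySem.List.pySetD table c sc.2) table) table
  if table ≠ [] then PySem.List.pySetD table 0 0 else table

-- ===== PRECONDITION & SPEC =====
def Spec_build_card_score_table_py (n_cards : Int) (out : List Int) : Prop := out = build_card_score_table_py_alt n_cards
instance (n_cards : Int) (out : List Int) : Decidable (Spec_build_card_score_table_py n_cards out) := by unfold Spec_build_card_score_table_py; infer_instance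

-- ===== CLAIM (what is proved, stated in full; the proofs are below) =====
def Claim_equal_build_card_score_table_py : Prop := ∀ (n_cards : Int), Dom_build_card_score_table_py n_cards → Spec_build_card_score_table_py n_cards (build_card_score_table_py n_cards)

-- ===== LEMMAS AND PROOFS =====

theorem length_foldl_pySetD (L : List Int) (g : Int → Int) (t : List Int) :
    (L.foldl (fun t c => PySem.List.pySetD t c (g c)) t).length = t.length := by
  induction L generalizing t with
  | nil => rfl
  | cons c L ih => rw [List.foldl_cons, ih, PySem.List.length_pySetD]

theorem getElem?_foldl_pySetD (L : List Int) (g : Int → Int) (t : List Int)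
    (hL : ∀ c ∈ L, 0 ≤ c) (k : Nat) :
    (L.foldl (fun t c => PySem.List.pySetD t c (g c)) t)[k]? =
      if (k : Int) ∈ L ∧ k < t.length then some (g k) else t[k]? := by
  induction L generalizing t with
  | nil => simp
  | cons c L ih =>
    have hc : 0 ≤ c := hL c (by simp)
    rw [List.foldl_cons, ih _ (fun x hx => hL x (List.mem_cons_of_mem _ hx)),
      PySem.List.pySetD_of_nonneg _ _ hc]
    simp only [List.getElem?_set, List.length_set, List.mem_cons]
    by_cases h1 : (k : Int) ∈ L
    · by_cases h2 : k < t.length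
      · simp [h1, h2]
      · simp only [h1, h2, and_false, if_false, or_true]
        by_cases h3 : c.toNat = k
        · simp [h3, h2]
        · simp [h3]
    · by_cases h3 : c.toNat = k
      · have hkc : (k : Int) = c := by omega
        by_cases h2 : k < t.length
        · rw [if_neg (by tauto), if_pos h3, if_pos (by omega), if_pos ⟨Or.inl hkc, h2⟩, hkc]
        · rw [if_neg (by tauto), if_pos h3, if_neg (by omega), if_neg (by tauto),
            List.getElem?_eq_none (by omega)]
      · have hkc : ¬ ((k : Int) = c) := by omega
        simp [h3, h1, hkc]

-- A's written value as a function of the card index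
def scoreA (c : Int) : Int :=
  if PySem.Int.mod c 55 = 0 then 7 else if PySem.Int.mod c 11 = 0 then 5
  else if PySem.Int.mod c 10 = 0 then 3 else if PySem.Int.mod c 5 = 0 then 2 else 1

theorem bodyA_eq : (fun (table : List Int) (c : Int) =>
      if PySem.Int.mod c 55 = 0 then PySem.List.pySetD table c 7
      else if PySem.Int.mod c 11 = 0 then PySem.List.pySetD table c 5
      else if PySem.Int.mod c 10 = 0 then PySem.List.pySetD table c 3
      else if PySem.Int.mod c 5 = 0 then PySem.List.pySetD table c 2
      else PySem.List.pySetD table c 1)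
    = fun table c => PySem.List.pySetD table c (scoreA c) := by
  funext t c
  simp only [scoreA]
  split_ifs <;> rfl

theorem A_getElem? (n : Int) (k : Nat) :
    (build_card_score_table_py n)[k]? =
      if 1 ≤ k ∧ k < (n + 1).toNat then some (scoreA k)
      else (List.replicate (n + 1).toNat (0 : Int))[k]? := by
  unfold build_card_score_table_py
  rw [bodyA_eq, getElem?_foldl_pySetD _ _ _
    (fun c hc => by have := (PySem.List.mem_pyRange_one (a := 1) (b := n+1) (x := c)).1 hc; omega)]
  simp only [PySem.List.mem_pyRange_one, List.length_replicate]
  by_cases h : 1 ≤ k ∧ k < (n + 1).toNat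
  · rw [if_pos (by constructor <;> [exact ⟨by omega, by omega⟩; omega]), if_pos h]
  · rw [if_neg (by rintro ⟨hm, hlen⟩; exact h ⟨by omega, hlen⟩), if_neg h]

theorem B_getElem? (n : Int) (k : Nat) (hk : k < (n + 1).toNat) :
    (build_card_score_table_py_alt n)[k]? =
      if k = 0 then some 0
      else if (55 : Int) ∣ (k : Int) then some 7
      else if (11 : Int) ∣ (k : Int) then some 5
      else if (10 : Int) ∣ (k : Int) then some 3
      else if (5 : Int) ∣ (k : Int) then some 2
      else some 1 := by
  unfold build_card_score_table_py_alt
  simp only [List.foldl_cons, List.foldl_nil]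
  have hmem : ∀ (s : Int), 0 < s → ∀ c ∈ PySem.List.pyRange s (n + 1) s, 0 ≤ c := by
    intro s hs c hc
    have := (PySem.List.mem_pyRange_iff_of_pos hs c).1 hc
    omega
  have hlen : ∀ (L : List Int) (g : Int → Int) (t : List Int),
      (L.foldl (fun t c => PySem.List.pySetD t c (g c)) t).length = t.length :=
    length_foldl_pySetD
  -- the four passes, innermost first
  set t0 := List.replicate (n + 1).toNat (1 : Int) with ht0
  have l0 : t0.length = (n + 1).toNat := by simp [ht0]
  have step : ∀ (s v : Int), 0 < s → ∀ (t : List Int), t.length = (n + 1).toNat →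
      ((PySem.List.pyRange s (n + 1) s).foldl (fun t c => PySem.List.pySetD t c v) t)[k]? =
        if s ∣ (k : Int) ∧ s ≤ (k : Int) then some v else t[k]? := by
    intro s v hs t hlt
    rw [getElem?_foldl_pySetD _ (fun _ => v) _ (hmem s hs)]
    simp only [PySem.List.mem_pyRange_iff_of_pos hs, hlt]
    by_cases h : s ∣ (k : Int) ∧ s ≤ (k : Int)
    · rw [if_pos ⟨⟨h.2, by omega, by exact (Int.dvd_sub h.1 (dvd_refl s))⟩, hk⟩, if_pos h]
    · rw [if_neg (by rintro ⟨⟨h1, h2, h3⟩, -⟩; exact h ⟨by have := Int.dvd_add h3 (dvd_refl s); simpa using this, h1⟩), if_neg h]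
  have hNE : ((PySem.List.pyRange 55 (n+1) 55).foldl (fun t c => PySem.List.pySetD t c 7)
      ((PySem.List.pyRange 11 (n+1) 11).foldl (fun t c => PySem.List.pySetD t c 5)
      ((PySem.List.pyRange 10 (n+1) 10).foldl (fun t c => PySem.List.pySetD t c 3)
      ((PySem.List.pyRange 5 (n+1) 5).foldl (fun t c => PySem.List.pySetD t c 2) t0)))) ≠ [] := by
    intro hnil
    have := congrArg List.length hnil
    simp only [hlen, l0, List.length_nil] at this
    omega
  rw [if_pos hNE, PySem.List.pySetD_of_nonneg _ _ (by omega : (0:Int) ≤ 0)]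
  simp only [List.getElem?_set]
  have hlen4 : ((PySem.List.pyRange 55 (n+1) 55).foldl (fun t c => PySem.List.pySetD t c 7)
      ((PySem.List.pyRange 11 (n+1) 11).foldl (fun t c => PySem.List.pySetD t c 5)
      ((PySem.List.pyRange 10 (n+1) 10).foldl (fun t c => PySem.List.pySetD t c 3)
      ((PySem.List.pyRange 5 (n+1) 5).foldl (fun t c => PySem.List.pySetD t c 2) t0)))).length
      = (n + 1).toNat := by simp only [hlen, l0]
  by_cases hk0 : k = 0
  · simp [hk0, hlen4, (by omega : 0 < (n+1).toNat)]
  · rw [if_neg (by omega), if_neg hk0]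
    rw [step 55 7 (by omega) _ (by simp only [hlen, l0]),
        step 11 5 (by omega) _ (by simp only [hlen, l0]),
        step 10 3 (by omega) _ (by simp only [hlen, l0]),
        step 5 2 (by omega) _ l0]
    have hk1 : 1 ≤ (k : Int) := by omega
    by_cases d55 : (55 : Int) ∣ (k : Int)
    · rw [if_pos ⟨d55, by omega⟩, if_pos d55]
    · rw [if_neg (by tauto), if_neg d55]
      by_cases d11 : (11 : Int) ∣ (k : Int)
      · rw [if_pos ⟨d11, by omega⟩, if_pos d11]
      · rw [if_neg (by tauto), if_neg d11]
        by_cases d10 : (10 : Int) ∣ (k : Int)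
        · rw [if_pos ⟨d10, by omega⟩, if_pos d10]
        · rw [if_neg (by tauto), if_neg d10]
          by_cases d5 : (5 : Int) ∣ (k : Int)
          · rw [if_pos ⟨d5, by omega⟩, if_pos d5]
          · rw [if_neg (by tauto), if_neg d5]
            simp [ht0, hk]

theorem lenA (n : Int) : (build_card_score_table_py n).length = (n + 1).toNat := by
  unfold build_card_score_table_py
  rw [bodyA_eq, length_foldl_pySetD, List.length_replicate]

theorem lenB (n : Int) : (build_card_score_table_py_alt n).length = (n + 1).toNat := by
  unfold build_card_score_table_py_alt
  simp only [List.foldl_cons, List.foldl_nil]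
  split
  · rw [PySem.List.length_pySetD]
    simp only [length_foldl_pySetD, List.length_replicate]
  · simp only [length_foldl_pySetD, List.length_replicate]

-- ===== VERDICT (by name: the statement is the Claim_ definition above) =====
theorem build_card_score_table_py_spec : Claim_equal_build_card_score_table_py := by
  intro n _
  unfold Spec_build_card_score_table_py
  apply List.ext_getElem?
  intro k
  by_cases hk : k < (n + 1).toNat
  · rw [A_getElem?, B_getElem? n k hk]
    by_cases hk0 : k = 0
    · subst hk0
      rw [if_neg (by omega), if_pos rfl]
      simp [show 0 < (n + 1).toNat by omega]
    · rw [if_pos ⟨by omega, hk⟩, if_neg hk0]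
      simp only [scoreA, PySem.Int.mod_eq_zero_iff_dvd]
      by_cases d55 : (55 : Int) ∣ (k : Int)
      · have d11 : (11 : Int) ∣ (k : Int) := dvd_trans (by norm_num) d55
        simp [d55]
      · simp only [d55, if_false]
        by_cases d11 : (11 : Int) ∣ (k : Int)
        · simp [d11]
        · simp only [d11, if_false]
          by_cases d10 : (10 : Int) ∣ (k : Int)
          · simp [d10]
          · simp only [d10, if_false]
            by_cases d5 : (5 : Int) ∣ (k : Int) <;> simp [d5]
  · rw [List.getElem?_eq_none (by rw [lenA]; omega),
        List.getElem?_eq_none (by rw [lenB]; omega)]
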